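-- pv_equiv track=rewrite | github.com/nikhil9111924/S26-LD3-assignment2 | projectivize.py | sink_arcs
-- ===== SOURCE A (Python) =====
-- def get_children(heads):
--     """Returns a dictionary mapping parents to list of children."""
--     children = {}
--     for i in range(len(heads)):
--         h = heads[i]
--         if h not in children: children[h] = []
--         children[h].append(i)
--     return children
--
-- def sink_arcs(words, heads, labels):
--     """
--     Decodes the labels to move arcs back down to their true parents.
--     Looks for labels with '^'.
--     """
--     # We repeat until no changes are made (handling multi-level lifts)
--     changed = True
--     while changed:
--         changed = False
--         children = get_children(heads)
--
--         for i in range(1, len(heads)):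
--             if '^' in labels[i]:
--                 # Decode the label: "RealLabel^SearchTarget"
--                 parts = labels[i].rsplit('^', 1)
--                 base_label = parts[0]
--                 target_head_label = parts[1]
--
--                 current_head = heads[i]
--
--                 # Search children of current_head for the "intermediate" node
--                 # The intermediate node should have the label 'target_head_label'
--                 found_new_head = -1
--
--                 if current_head in children:
--                     for sibling in children[current_head]:
--                         if sibling == i: continue # Skip self
--                         if labels[sibling] == target_head_label:
--                             found_new_head = sibling
--                             break
--
--                 # If we found the intermediate node, move the arc down!
--                 if found_new_head != -1:
--                     heads[i] = found_new_head
--                     labels[i] = base_label # Remove the ^Tag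
--                     changed = True
--
--     return heads, labels
-- ===== SOURCE B (Python) =====
-- def sink_arcs(words, heads, labels):
--     """
--     Decodes the labels to move arcs back down to their true parents.
--     Keeps a (stale parent, current label) -> ascending child indices index per pass
--     and answers each search by a dictionary lookup instead of scanning siblings.
--     Mutates heads and labels in place, like the original.
--     """
--     n = len(heads)
--     changed = True
--     while changed:
--         changed = False
--         snap = heads[:]                      # heads as they stood at the start of this pass
--         index = {}
--         for j, (h, lab) in enumerate(zip(snap, labels)):
--             index.setdefault((h, lab), []).append(j)
--         for i in range(1, n):
--             lab = labels[i]
--             k = lab.rfind('^')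
--             if k < 0:
--                 continue
--             base, target = lab[:k], lab[k + 1:]
--             bucket = index.get((heads[i], target), [])
--             found = next((s for s in bucket if s != i), -1)
--             if found != -1:
--                 heads[i] = found
--                 labels[i] = base
--                 changed = True
--                 # token i changes its label: move it between buckets of its stale parent
--                 index[(snap[i], lab)].remove(i)
--                 dest = index.setdefault((snap[i], base), [])
--                 p = 0
--                 while p < len(dest) and dest[p] < i:
--                     p += 1
--                 dest.insert(p, i)
--     return heads, labels
-- ===== Notes on version B (the rewrite author's own statement) =====
-- stated objective: alternative
-- what changed: Instead of rebuilding a parent->children dictionary each pass and linearly scanning all siblings of the current head for the first one carrying the target label, B builds one (stale-parent, current-label) -> sorted-child-indices index per pass from zip(snap, labels), answers each search by a direct dictionary lookup, and incrementally moves a token between buckets when its label changes.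
import Mathlib
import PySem

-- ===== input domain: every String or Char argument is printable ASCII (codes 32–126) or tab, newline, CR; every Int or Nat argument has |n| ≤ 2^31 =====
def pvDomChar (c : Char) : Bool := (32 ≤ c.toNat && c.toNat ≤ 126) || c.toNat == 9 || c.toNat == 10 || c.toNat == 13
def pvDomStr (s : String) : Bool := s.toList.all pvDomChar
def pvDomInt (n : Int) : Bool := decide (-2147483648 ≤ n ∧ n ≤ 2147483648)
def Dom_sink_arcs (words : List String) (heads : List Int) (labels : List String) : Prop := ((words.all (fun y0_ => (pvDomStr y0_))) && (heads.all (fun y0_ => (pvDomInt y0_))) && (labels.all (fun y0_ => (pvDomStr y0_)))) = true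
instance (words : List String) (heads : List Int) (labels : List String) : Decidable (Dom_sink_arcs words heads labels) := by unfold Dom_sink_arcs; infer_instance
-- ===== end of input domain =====

-- B replaces A's per-pass children dictionary and inner sibling scan by a maintained
-- (stale-parent, current-label) → sorted-child-indices index, looked up directly per token.
-- Both A and B mutate `heads`/`labels` in place in Python (identically); the theorem is about the return value.
-- Both while-loops terminate because every arc move deletes one '^' from some label, so
-- (total number of '^' characters + 1) passes always suffice; both ports use exactly that
-- number as structural fuel (a totality guard only, not a change of algorithm).
def pvFuel (labels : List String) : Nat :=
  (labels.map (fun s => s.toList.count '^')).sum + 1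

-- ===== PORT A =====
def pvGetChildren (heads : List Int) : PySem.Dict Int (List Int) :=
  (PySem.List.enumerate heads).foldl
    (fun ch p =>
      (if ch.contains p.2 then ch else ch.insert p.2 []).modify p.2 [] (fun l => l ++ [p.1]))
    PySem.Dict.empty

-- the body of A's `for i in range(1, len(heads))` loop; labels[i].rsplit('^', 1) with '^'
-- present is exactly (labels[i][:k], labels[i][k+1:]) with k the highest index of '^'
def pvStepA (children : PySem.Dict Int (List Int)) (st : List Int × List String × Bool)
    (i : Int) : List Int × List String × Bool :=
  let labi := PySem.List.pyGetD st.2.1 i ""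
  if PySem.Str.isIn "^" labi then
    let k := PySem.Str.rfind labi "^"
    let base := PySem.Str.slice labi none (some k)
    let target := PySem.Str.slice labi (some (k + 1)) none
    let currentHead := PySem.List.pyGetD st.1 i 0
    let found : Int :=
      match children.get? currentHead with
      | none => -1
      | some sibs =>
        match sibs.find? (fun s => s != i && PySem.List.pyGetD st.2.1 s "" == target) with
        | some s => s
        | none => -1
    if found != -1 then
      (PySem.List.pySetD st.1 i found, PySem.List.pySetD st.2.1 i base, true)
    else st
  else st

def pvPassA (heads : List Int) (labels : List String) : List Int × List String × Bool :=
  let children := pvGetChildren heads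
  (PySem.List.pyRange 1 (PySem.List.len heads)).foldl (pvStepA children) (heads, labels, false)

def pvLoopA : Nat → List Int → List String → List Int × List String
  | 0, hd, lb => (hd, lb)
  | Nat.succ fuel, hd, lb =>
      let r := pvPassA hd lb
      if r.2.2 then pvLoopA fuel r.1 r.2.1 else (r.1, r.2.1)

def sink_arcs (words : List String) (heads : List Int) (labels : List String) : List Int × List String :=
  pvLoopA (pvFuel labels) heads labels

-- ===== PORT B =====
-- `dest.insert(p, i)` after the linear scan for the insertion point
def pvInsSorted (dest : List Int) (i : Int) : List Int :=
  match dest with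
  | [] => [i]
  | x :: xs => if x < i then x :: pvInsSorted xs i else i :: x :: xs

-- `for j, (h, lab) in enumerate(zip(snap, labels)): index.setdefault((h, lab), []).append(j)`
def pvBuildIndex (snap : List Int) (labels : List String) : PySem.Dict (Int × String) (List Int) :=
  (PySem.List.enumerate (snap.zip labels)).foldl
    (fun d p => d.modify (p.2.1, p.2.2) [] (fun l => l ++ [p.1]))
    PySem.Dict.empty

-- the body of B's `for i in range(1, n)` loop; `index[(snap[i], lab)].remove(i)` always finds
-- i present, so the total `(remove? …).getD` is exact there
def pvStepB (snap : List Int)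
    (st : List Int × List String × PySem.Dict (Int × String) (List Int) × Bool)
    (i : Int) : List Int × List String × PySem.Dict (Int × String) (List Int) × Bool :=
  let lab := PySem.List.pyGetD st.2.1 i ""
  let k := PySem.Str.rfind lab "^"
  if k < 0 then st
  else
    let base := PySem.Str.slice lab none (some k)
    let target := PySem.Str.slice lab (some (k + 1)) none
    let bucket := st.2.2.1.getD (PySem.List.pyGetD st.1 i 0, target) []
    let found : Int :=
      match bucket.find? (fun s => s != i) with
      | some s => s
      | none => -1
    if found != -1 then
      let idx := st.2.2.1.modify (PySem.List.pyGetD snap i 0, lab) []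
                  (fun l => (PySem.List.remove? l i).getD l)
      let idx := idx.modify (PySem.List.pyGetD snap i 0, base) [] (fun l => pvInsSorted l i)
      (PySem.List.pySetD st.1 i found, PySem.List.pySetD st.2.1 i base, idx, true)
    else st

def pvPassB (heads : List Int) (labels : List String) : List Int × List String × Bool :=
  let snap := heads
  let res := (PySem.List.pyRange 1 (PySem.List.len heads)).foldl (pvStepB snap)
    (heads, labels, pvBuildIndex snap labels, false)
  (res.1, res.2.1, res.2.2.2)

def pvLoopB : Nat → List Int → List String → List Int × List String
  | 0, hd, lb => (hd, lb)
  | Nat.succ fuel, hd, lb =>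
      let r := pvPassB hd lb
      if r.2.2 then pvLoopB fuel r.1 r.2.1 else (r.1, r.2.1)

def sink_arcs_alt (words : List String) (heads : List Int) (labels : List String) : List Int × List String :=
  pvLoopB (pvFuel labels) heads labels

-- ===== PRECONDITION & SPEC =====
-- Pre_ excludes exactly the inputs on which Python A raises IndexError: fewer labels than
-- heads with len(heads) ≥ 2 (A's loop reads labels[i] for i = 1..len(heads)-1; B reads the
-- same labels[i] and raises there too). On len(heads) ≤ 1 both loops are empty and both return.
def Pre_sink_arcs (words : List String) (heads : List Int) (labels : List String) : Prop :=
  heads.length ≤ labels.length ∨ heads.length ≤ 1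
instance (words : List String) (heads : List Int) (labels : List String) : Decidable (Pre_sink_arcs words heads labels) := by unfold Pre_sink_arcs; infer_instance

def pvWitness_sink_arcs : List String × List Int × List String :=
  (["He", "left", "home"], [2, 3, 0], ["X^L", "L", "root"])

def Spec_sink_arcs (words : List String) (heads : List Int) (labels : List String) (out : List Int × List String) : Prop := out = sink_arcs_alt words heads labels
instance (words : List String) (heads : List Int) (labels : List String) (out : List Int × List String) : Decidable (Spec_sink_arcs words heads labels out) := by unfold Spec_sink_arcs; infer_instance

-- ===== CLAIM (what is proved, stated in full; the proofs are below) =====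
def Claim_equal_sink_arcs : Prop := ∀ (words : List String) (heads : List Int) (labels : List String), Dom_sink_arcs words heads labels → Pre_sink_arcs words heads labels → Spec_sink_arcs words heads labels (sink_arcs words heads labels)

-- ===== LEMMAS AND PROOFS =====

-- children[h] as A computes it per pass: indices j with heads-at-pass-start[j] == h, ascending
def pvKids (snap : List Int) (h : Int) : List Int :=
  (PySem.List.pyRange 0 (PySem.List.len snap)).filter
    (fun j => PySem.List.pyGetD snap j 0 == h)

-- B's bucket for key (h, t): indices j with snap[j] == h and current label t, ascending
def pvBkt (snap : List Int) (lb : List String) (h : Int) (t : String) : List Int :=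
  (PySem.List.pyRange 0 (PySem.List.len snap)).filter
    (fun j => PySem.List.pyGetD snap j 0 == h && PySem.List.pyGetD lb j "" == t)

-- the coupling invariant: B's index is exactly the bucket table for the current labels
def pvInv (snap : List Int) (lb : List String)
    (idx : PySem.Dict (Int × String) (List Int)) : Prop :=
  ∀ h t, idx.getD (h, t) [] = pvBkt snap lb h t

theorem pvFind?Ext {α : Type} (p q : α → Bool) (l : List α)
    (h : ∀ a ∈ l, p a = q a) : l.find? p = l.find? q := by
  induction l with
  | nil => rfl
  | cons x xs ih =>
    have hx := h x (List.mem_cons_self)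
    simp only [List.find?_cons, ← hx]
    cases hpx : p x with
    | true => rfl
    | false => exact ih (fun a ha => h a (List.mem_cons_of_mem _ ha))

theorem pvRangePairwise (m : Nat) : (PySem.List.pyRange 0 (m : Int)).Pairwise (· < ·) := by
  rw [PySem.List.pyRange_zero_natCast]
  exact List.Pairwise.map _ (fun a b h => by exact_mod_cast h) List.pairwise_lt_range

theorem pvRemoveMem (l : List Int) (i : Int) (h : i ∈ l) :
    (PySem.List.remove? l i).getD l = l.erase i := by
  induction l with
  | nil => simp at h
  | cons x xs ih =>
    by_cases hx : x = i
    · subst hx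
      simp [PySem.List.remove?, List.idxOf?_cons]
    · have hm : i ∈ xs := by
        rcases List.mem_cons.mp h with h1 | h1
        · exact absurd h1.symm hx
        · exact h1
      have := ih hm
      simp only [PySem.List.remove?] at this ⊢
      rw [List.idxOf?_cons]
      have hbe : (x == i) = false := by simpa using hx
      simp only [hbe]
      cases hio : List.idxOf? i xs with
      | none => exact absurd hm (List.idxOf?_eq_none_iff.mp hio)
      | some k =>
        simp [hio, hbe] at this ⊢
        simpa [List.eraseIdx_cons_succ] using this

-- ---- characterisation of A's children dictionary ----
theorem pvChildrenFold (l : List (Int × Int)) (d : PySem.Dict Int (List Int)) (h : Int) :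
    ((l.foldl
        (fun ch p =>
          (if ch.contains p.2 then ch else ch.insert p.2 []).modify p.2 [] (fun s => s ++ [p.1]))
        d).getD h [])
      = d.getD h [] ++ (l.filter (fun p => p.2 == h)).map (·.1) := by
  induction l generalizing d with
  | nil => simp
  | cons p rest ih =>
    simp only [List.foldl_cons, List.filter_cons]
    rw [ih]
    have hbase : ∀ x, (if d.contains p.2 then d else d.insert p.2 []).getD x [] = d.getD x [] := by
      intro x
      cases hc : d.contains p.2 with
      | true => simp
      | false =>
        simp only [Bool.false_eq_true, if_false]
        by_cases hx : x = p.2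
        · rw [hx, PySem.Dict.getD_insert_self]
          have hn : d.get? p.2 = none := (PySem.Dict.get?_eq_none_iff_contains d p.2).mpr hc
          simp [PySem.Dict.getD, hn]
        · rw [PySem.Dict.getD_insert_of_ne _ _ _ hx]
    rw [PySem.Dict.getD_modify]
    by_cases hh : h = p.2
    · subst hh
      simp [hbase]
    · have : (p.2 == h) = false := by simpa using (Ne.symm hh)
      simp [hh, hbase, this]

theorem pvChildrenGetD (snap : List Int) (h : Int) :
    (pvGetChildren snap).getD h [] = pvKids snap h := by
  unfold pvGetChildren pvKids
  rw [pvChildrenFold]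
  have he : (PySem.Dict.empty : PySem.Dict Int (List Int)).getD h [] = [] := rfl
  rw [he, List.nil_append, PySem.List.enumerate_eq_map_pyRange snap 0,
    List.filter_map, List.map_map]
  simp [Function.comp_def]

theorem pvChildrenNone (snap : List Int) (h : Int)
    (hn : (pvGetChildren snap).get? h = none) : pvKids snap h = [] := by
  have := pvChildrenGetD snap h
  rw [PySem.Dict.getD, hn] at this
  exact this.symm

theorem pvChildrenSome (snap : List Int) (h : Int) (sibs : List Int)
    (hs : (pvGetChildren snap).get? h = some sibs) : sibs = pvKids snap h := by
  have := pvChildrenGetD snap h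
  rw [PySem.Dict.getD, hs] at this
  exact this

-- ---- characterisation of B's built index ----
theorem pvBuildFold (l : List (Int × (Int × String)))
    (d : PySem.Dict (Int × String) (List Int)) (c : Int × String) :
    ((l.foldl (fun d p => d.modify (p.2.1, p.2.2) [] (fun s => s ++ [p.1])) d).getD c [])
      = d.getD c [] ++ (l.filter (fun p => (p.2.1, p.2.2) == c)).map (·.1) := by
  induction l generalizing d with
  | nil => simp
  | cons p rest ih =>
    simp only [List.foldl_cons, List.filter_cons]
    rw [ih, PySem.Dict.getD_modify]
    by_cases hc : c = (p.2.1, p.2.2)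
    · simp [hc]
    · have : ((p.2.1, p.2.2) == c) = false := by simpa using (fun he => hc he.symm)
      simp [hc, this]

theorem pvPairBeq (a c : Int) (b d : String) :
    ((a, b) == (c, d)) = (a == c && b == d) := rfl

theorem pvZipGetD (snap : List Int) (lb : List String) (j : Int)
    (h0 : 0 ≤ j) (hj : j.toNat < snap.length) (hlen : snap.length ≤ lb.length) :
    PySem.List.pyGetD (snap.zip lb) j (0, "")
      = (PySem.List.pyGetD snap j 0, PySem.List.pyGetD lb j "") := by
  unfold PySem.List.pyGetD
  rw [PySem.List.pyGet?_of_nonneg _ h0, PySem.List.pyGet?_of_nonneg _ h0,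
    PySem.List.pyGet?_of_nonneg _ h0]
  have hjl : j.toNat < lb.length := by omega
  have hz : j.toNat < (snap.zip lb).length := by
    rw [List.length_zip]; omega
  rw [List.getElem?_eq_getElem hz, List.getElem?_eq_getElem hj, List.getElem?_eq_getElem hjl]
  simp [List.getElem_zip]

theorem pvBuildIndexInv (snap : List Int) (lb : List String)
    (hlen : snap.length ≤ lb.length) : pvInv snap lb (pvBuildIndex snap lb) := by
  intro h t
  unfold pvBuildIndex pvBkt
  rw [pvBuildFold]
  have he : (PySem.Dict.empty : PySem.Dict (Int × String) (List Int)).getD (h, t) [] = [] := rfl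
  rw [he, List.nil_append, PySem.List.enumerate_eq_map_pyRange (snap.zip lb) (0, ""),
    List.filter_map, List.map_map]
  have hlz : PySem.List.len (snap.zip lb) = PySem.List.len snap := by
    rw [PySem.List.len_eq, PySem.List.len_eq, List.length_zip]
    congr 1; omega
  rw [hlz]
  have : ∀ j ∈ PySem.List.pyRange 0 (PySem.List.len snap),
      ((fun p => (p.2.1, p.2.2) == (h, t)) ∘ fun j => (j, PySem.List.pyGetD (snap.zip lb) j (0, ""))) j
        = (PySem.List.pyGetD snap j 0 == h && PySem.List.pyGetD lb j "" == t) := by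
    intro j hj
    obtain ⟨hj0, hjn⟩ := PySem.List.mem_pyRange_one.mp hj
    rw [PySem.List.len_eq] at hjn
    have hjN : j.toNat < snap.length := by omega
    simp only [Function.comp_def]
    rw [pvZipGetD snap lb j hj0 hjN hlen, pvPairBeq]
  rw [List.filter_congr this]
  simp [Function.comp_def]

-- ---- facts about rfind(… , '^') ----
theorem pvRfindGoCases (s sub : List Char) : ∀ x : Nat,
    (PySem.Chars.rfind.go s sub x = -1 ∧ ∀ j : Nat, j ≤ x → ¬ (sub.isPrefixOf (s.drop j) = true))
    ∨ (∃ jn : Nat, PySem.Chars.rfind.go s sub x = (jn : Int) ∧ sub.isPrefixOf (s.drop jn) = true) := by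
  intro x
  induction x with
  | zero =>
    by_cases h : sub.isPrefixOf (s.drop 0) = true
    · right
      refine ⟨0, ?_, h⟩
      show (if sub.isPrefixOf s then (0 : Int) else -1) = ((0 : Nat) : Int)
      rw [if_pos (by simpa [List.drop_zero] using h)]
      rfl
    · left
      constructor
      · show (if sub.isPrefixOf s then (0 : Int) else -1) = -1
        rw [if_neg (by simpa [List.drop_zero] using h)]
      · intro j hj
        interval_cases j
        exact h
  | succ n ih =>
    by_cases h : sub.isPrefixOf (s.drop (n + 1)) = true
    · right
      refine ⟨n + 1, ?_, h⟩
      show (if sub.isPrefixOf (s.drop (n + 1)) then ((n : Int) + 1) else PySem.Chars.rfind.go s sub n) = _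
      rw [if_pos h]
      push_cast; ring
    · have hgo : PySem.Chars.rfind.go s sub (n + 1) = PySem.Chars.rfind.go s sub n := by
        show (if sub.isPrefixOf (s.drop (n + 1)) then ((n : Int) + 1) else PySem.Chars.rfind.go s sub n) = _
        rw [if_neg h]
      rcases ih with ⟨h1, h2⟩ | ⟨jn, h1, h2⟩
      · left
        refine ⟨by rw [hgo]; exact h1, fun j hj => ?_⟩
        by_cases hje : j = n + 1
        · subst hje; exact h
        · exact h2 j (by omega)
      · right; exact ⟨jn, by rw [hgo]; exact h1, h2⟩

theorem pvRfindNegIff (s : String) :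
    PySem.Str.rfind s "^" < 0 ↔ PySem.Str.isIn "^" s = false := by
  rw [PySem.Str.rfind_eq]
  show PySem.Chars.rfind s.toList "^".toList < 0 ↔ _
  have hiff := PySem.Chars.exists_prefix_drop_iff_isIn ("^".toList) s.toList
  have hstr : PySem.Str.isIn "^" s = PySem.Chars.isIn "^".toList s.toList := rfl
  unfold PySem.Chars.rfind
  rcases pvRfindGoCases s.toList "^".toList s.toList.length with ⟨h1, h2⟩ | ⟨jn, h1, h2⟩
  · rw [h1]
    constructor
    · intro _
      rw [hstr, ← Bool.not_eq_true, ← hiff]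
      rintro ⟨j, hj⟩
      by_cases hjl : j ≤ s.toList.length
      · exact h2 j hjl (List.isPrefixOf_iff_prefix.mpr hj)
      · rw [List.drop_eq_nil_of_le (by omega)] at hj
        have hh := List.prefix_nil.mp hj
        exact absurd hh (by decide)
    · intro _; norm_num
  · rw [h1]
    constructor
    · intro hlt; exfalso; omega
    · intro hfalse
      exfalso
      have ht : PySem.Chars.isIn "^".toList s.toList = true :=
        hiff.mp ⟨jn, List.isPrefixOf_iff_prefix.mp h2⟩
      rw [hstr, ht] at hfalse
      simp at hfalse

theorem pvRfindLt (s : String) (h : 0 ≤ PySem.Str.rfind s "^") :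
    (PySem.Str.rfind s "^").toNat < s.toList.length := by
  rw [PySem.Str.rfind_eq] at h ⊢
  unfold PySem.Chars.rfind at h ⊢
  rcases pvRfindGoCases s.toList "^".toList s.toList.length with ⟨h1, _⟩ | ⟨jn, h1, h2⟩
  · rw [h1] at h; omega
  · rw [h1]
    have hpre := List.isPrefixOf_iff_prefix.mp h2
    have hne : s.toList.drop jn ≠ [] := by
      intro hnil
      rw [hnil] at hpre
      have hh := List.prefix_nil.mp hpre
      exact absurd hh (by decide)
    have : jn < s.toList.length := by
      by_contra hge
      exact hne (List.drop_eq_nil_of_le (by omega))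
    simpa using this

theorem pvBaseNe (s : String) (h : 0 ≤ PySem.Str.rfind s "^") :
    PySem.Str.slice s none (some (PySem.Str.rfind s "^")) ≠ s := by
  intro he
  have htl := congrArg String.toList he
  rw [PySem.Str.toList_slice, PySem.Chars.slice_eq_listSlice, PySem.List.slice_to _ h] at htl
  have hlen := congrArg List.length htl
  rw [List.length_take] at hlen
  have := pvRfindLt s h
  omega

theorem pvInRangeOfHat (lb : List String) (i : Int) (hi : 0 ≤ i)
    (h : PySem.Str.isIn "^" (PySem.List.pyGetD lb i "") = true) :
    i.toNat < lb.length := by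
  cases hg : PySem.List.pyGet? lb i with
  | none =>
    rw [PySem.List.pyGetD_of_none lb i "" hg] at h
    exact absurd h (by decide)
  | some v =>
    have : PySem.List.pyGet? lb i ≠ none := by simp [hg]
    have hr := not_not.mp (fun hP => this ((PySem.List.pyGet?_eq_none_iff lb i).mpr hP))
    unfold PySem.Raise.InRange at hr
    omega

theorem pvSetDIn {α : Type} (xs : List α) (i : Int) (v : α) (h0 : 0 ≤ i)
    (h : i.toNat < xs.length) : PySem.List.pySetD xs i v = xs.set i.toNat v := by
  unfold PySem.List.pySetD PySem.List.pySet? PySem.List.pyIdx?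
  rw [if_pos h0, if_pos (by omega)]
  rfl

theorem pvGetDSetNe {α : Type} (xs : List α) (m : Nat) (v : α) (j : Int) (d : α)
    (hj : 0 ≤ j) (hne : j ≠ (m : Int)) :
    PySem.List.pyGetD (xs.set m v) j d = PySem.List.pyGetD xs j d := by
  unfold PySem.List.pyGetD
  rw [PySem.List.pyGet?_of_nonneg _ hj, PySem.List.pyGet?_of_nonneg _ hj,
    List.getElem?_set_ne (by omega)]

theorem pvGetDSetSelf {α : Type} (xs : List α) (m : Nat) (v : α) (d : α)
    (h : m < xs.length) :
    PySem.List.pyGetD (xs.set m v) (m : Int) d = v := by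
  unfold PySem.List.pyGetD
  rw [PySem.List.pyGet?_natCast, List.getElem?_set_self (by simpa using h)]
  rfl

-- ---- the sorted insert ----
theorem pvInsSortedHead (l : List Int) (i : Int) (h : ∀ x ∈ l, ¬ x < i) :
    pvInsSorted l i = i :: l := by
  cases l with
  | nil => rfl
  | cons x xs =>
    unfold pvInsSorted
    rw [if_neg (h x List.mem_cons_self)]

theorem pvInsSortedFilter (r : List Int) (hp : r.Pairwise (· < ·)) (p q : Int → Bool)
    (i : Int) (hi : i ∈ r) (hpi : p i = false)
    (hq : ∀ j ∈ r, q j = (p j || j == i)) :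
    pvInsSorted (r.filter p) i = r.filter q := by
  induction r with
  | nil => simp at hi
  | cons x rs ih =>
    have hlt : ∀ y ∈ rs, x < y := List.pairwise_cons.mp hp |>.1
    have hp' : rs.Pairwise (· < ·) := List.pairwise_cons.mp hp |>.2
    by_cases hx : x = i
    · subst hx
      rw [List.filter_cons, hpi]
      simp only [Bool.false_eq_true, if_false]
      have hgt : ∀ y ∈ rs.filter p, ¬ y < x := by
        intro y hy
        exact not_lt_of_gt (hlt y (List.mem_of_mem_filter hy))
      rw [pvInsSortedHead _ _ hgt, List.filter_cons]
      have hqx : q x = true := by rw [hq x List.mem_cons_self, hpi]; simp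
      rw [hqx]
      congr 1
      apply List.filter_congr
      intro y hy
      have : (y == x) = false := by
        have := hlt y hy
        simp [Int.ne_of_gt this]
      rw [hq y (List.mem_cons_of_mem _ hy), this, Bool.or_false]
    · have hi' : i ∈ rs := by
        rcases List.mem_cons.mp hi with h1 | h1
        · exact absurd h1.symm hx
        · exact h1
      have hxi : x < i := hlt i hi'
      have hqx : q x = p x := by
        rw [hq x List.mem_cons_self]
        have : (x == i) = false := by simp [hx]
        rw [this, Bool.or_false]
      rw [List.filter_cons, List.filter_cons, hqx]
      by_cases hpx : p x = true
      · rw [if_pos hpx, if_pos hpx]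
        have hcons : pvInsSorted (x :: List.filter p rs) i
            = x :: pvInsSorted (List.filter p rs) i := by
          simp only [pvInsSorted, if_pos hxi]
        rw [hcons, ih hp' hi' (fun j hj => hq j (List.mem_cons_of_mem _ hj))]
      · rw [if_neg hpx, if_neg hpx]
        exact ih hp' hi' (fun j hj => hq j (List.mem_cons_of_mem _ hj))

-- ---- the two searches agree ----
theorem pvBktEqFilterKids (snap : List Int) (lb : List String) (h : Int) (t : String) :
    pvBkt snap lb h t
      = (pvKids snap h).filter (fun j => PySem.List.pyGetD lb j "" == t) := by
  unfold pvBkt pvKids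
  rw [List.filter_filter]
  apply List.filter_congr
  intro j _
  exact Bool.and_comm _ _

theorem pvFoundEq (snap : List Int) (lb : List String) (h : Int) (t : String) (i : Int) :
    (match (pvGetChildren snap).get? h with
      | none => (-1 : Int)
      | some sibs =>
        match sibs.find? (fun s => s != i && PySem.List.pyGetD lb s "" == t) with
        | some s => s
        | none => -1)
    = (match (pvBkt snap lb h t).find? (fun s => s != i) with
        | some s => s
        | none => -1) := by
  cases hg : (pvGetChildren snap).get? h with
  | none =>
    have hk : pvKids snap h = [] := pvChildrenNone snap h hg
    rw [pvBktEqFilterKids, hk]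
    rfl
  | some sibs =>
    have hs : sibs = pvKids snap h := pvChildrenSome snap h sibs hg
    subst hs
    show (match (pvKids snap h).find? (fun s => s != i && PySem.List.pyGetD lb s "" == t) with
          | some s => s
          | none => (-1 : Int)) = _
    rw [pvBktEqFilterKids, List.find?_filter]
    have hext : (pvKids snap h).find? (fun s => s != i && PySem.List.pyGetD lb s "" == t)
        = (pvKids snap h).find?
            (fun a => decide ((PySem.List.pyGetD lb a "" == t) = true ∧ (a != i) = true)) := by
      apply pvFind?Ext
      intro a _
      cases h1 : (a != i) <;> cases h2 : (PySem.List.pyGetD lb a "" == t) <;> simp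
    rw [hext]

-- ---- the invariant survives B's two index updates when token i gets label `base` ----
theorem pvInvUpdate (snap : List Int) (lb : List String)
    (idx : PySem.Dict (Int × String) (List Int)) (i : Int) (base : String)
    (hInv : pvInv snap lb idx) (h0 : 0 ≤ i) (hlen : i < PySem.List.len snap)
    (hiN : i.toNat < lb.length) (hbne : base ≠ PySem.List.pyGetD lb i "") :
    pvInv snap (lb.set i.toNat base)
      ((idx.modify (PySem.List.pyGetD snap i 0, PySem.List.pyGetD lb i "") []
          (fun l => (PySem.List.remove? l i).getD l)).modify
        (PySem.List.pyGetD snap i 0, base) [] (fun l => pvInsSorted l i)) := by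
  have hcast : ((i.toNat : Int)) = i := Int.toNat_of_nonneg h0
  have him : i ∈ PySem.List.pyRange 0 (PySem.List.len snap) :=
    PySem.List.mem_pyRange_one.mpr ⟨h0, hlen⟩
  have hpw : (PySem.List.pyRange 0 (PySem.List.len snap)).Pairwise (· < ·) := by
    rw [PySem.List.len_eq]; exact pvRangePairwise _
  have hnd : (PySem.List.pyRange 0 (PySem.List.len snap)).Nodup :=
    hpw.imp (fun h => ne_of_lt h)
  have hget' : ∀ (j : Int), 0 ≤ j → j ≠ i →
      PySem.List.pyGetD (lb.set i.toNat base) j "" = PySem.List.pyGetD lb j "" := by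
    intro j hj hne
    exact pvGetDSetNe lb i.toNat base j "" hj (by omega)
  have hgetI : PySem.List.pyGetD (lb.set i.toNat base) i "" = base := by
    rw [← hcast]; exact pvGetDSetSelf lb i.toNat base "" hiN
  have hmem0 : ∀ j ∈ PySem.List.pyRange 0 (PySem.List.len snap), 0 ≤ j := by
    intro j hj; exact (PySem.List.mem_pyRange_one.mp hj).1
  -- removal: the (snap[i], old-label) bucket loses i
  have hrm : (PySem.List.remove? (pvBkt snap lb (PySem.List.pyGetD snap i 0) (PySem.List.pyGetD lb i "")) i).getD
        (pvBkt snap lb (PySem.List.pyGetD snap i 0) (PySem.List.pyGetD lb i ""))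
      = pvBkt snap (lb.set i.toNat base) (PySem.List.pyGetD snap i 0) (PySem.List.pyGetD lb i "") := by
    have hmem : i ∈ pvBkt snap lb (PySem.List.pyGetD snap i 0) (PySem.List.pyGetD lb i "") := by
      unfold pvBkt
      exact List.mem_filter.mpr ⟨him, by simp⟩
    rw [pvRemoveMem _ _ hmem]
    have hndb : (pvBkt snap lb (PySem.List.pyGetD snap i 0) (PySem.List.pyGetD lb i "")).Nodup := by
      unfold pvBkt; exact hnd.filter _
    rw [List.Nodup.erase_eq_filter hndb i]
    unfold pvBkt
    rw [List.filter_filter]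
    apply List.filter_congr
    intro j hj
    by_cases hji : j = i
    · rw [hji, hgetI]
      have e : (base == PySem.List.pyGetD lb i "") = false := beq_eq_false_iff_ne.mpr hbne
      simp [e]
    · rw [hget' j (hmem0 j hj) hji]
      have e : (j != i) = true := by simp [hji]
      rw [e, Bool.true_and]
  -- insertion: the (snap[i], base) bucket gains i in sorted position
  have hins : pvInsSorted (pvBkt snap lb (PySem.List.pyGetD snap i 0) base) i
      = pvBkt snap (lb.set i.toNat base) (PySem.List.pyGetD snap i 0) base := by
    unfold pvBkt
    apply pvInsSortedFilter _ hpw _ _ i him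
    · have : (PySem.List.pyGetD lb i "" == base) = false :=
        beq_eq_false_iff_ne.mpr (fun he => hbne he.symm)
      simp [this]
    · intro j hj
      by_cases hji : j = i
      · rw [hji, hgetI]
        simp
      · rw [hget' j (hmem0 j hj) hji]
        have : (j == i) = false := by simp [hji]
        rw [this, Bool.or_false]
  -- any other key: the bucket is untouched
  have hoth : ∀ (h : Int) (t : String), (h, t) ≠ (PySem.List.pyGetD snap i 0, PySem.List.pyGetD lb i "") →
      (h, t) ≠ (PySem.List.pyGetD snap i 0, base) →
      pvBkt snap lb h t = pvBkt snap (lb.set i.toNat base) h t := by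
    intro h t hn1 hn2
    unfold pvBkt
    apply List.filter_congr
    intro j hj
    by_cases hji : j = i
    · rw [hji]
      by_cases hsh : (PySem.List.pyGetD snap i 0 == h) = true
      · have hh : PySem.List.pyGetD snap i 0 = h := by simpa using hsh
        have ht1 : t ≠ PySem.List.pyGetD lb i "" := by
          intro he; exact hn1 (by rw [← hh, he])
        have ht2 : t ≠ base := by
          intro he; exact hn2 (by rw [← hh, he])
        have e1 : (PySem.List.pyGetD lb i "" == t) = false :=
          beq_eq_false_iff_ne.mpr (fun he => ht1 he.symm)
        have e2 : (PySem.List.pyGetD (lb.set i.toNat base) i "" == t) = false := by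
          rw [hgetI]; exact beq_eq_false_iff_ne.mpr (fun he => ht2 he.symm)
        rw [e1, e2]
      · have e : (PySem.List.pyGetD snap i 0 == h) = false := by
          simpa using hsh
        rw [e]
        simp
    · rw [hget' j (hmem0 j hj) hji]
  -- put the three cases together
  intro h t
  rw [PySem.Dict.getD_modify]
  by_cases hc2 : (h, t) = (PySem.List.pyGetD snap i 0, base)
  · rw [if_pos hc2, PySem.Dict.getD_modify,
      if_neg (by
        intro he
        exact hbne (congrArg Prod.snd he)), hInv]
    have hh : h = PySem.List.pyGetD snap i 0 := congrArg Prod.fst hc2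
    have ht : t = base := congrArg Prod.snd hc2
    rw [hh, ht]
    exact hins
  · rw [if_neg hc2, PySem.Dict.getD_modify]
    by_cases hc1 : (h, t) = (PySem.List.pyGetD snap i 0, PySem.List.pyGetD lb i "")
    · rw [if_pos hc1, hInv]
      have hh : h = PySem.List.pyGetD snap i 0 := congrArg Prod.fst hc1
      have ht : t = PySem.List.pyGetD lb i "" := congrArg Prod.snd hc1
      rw [hh, ht]
      exact hrm
    · rw [if_neg hc1, hInv]
      exact hoth h t hc1 hc2

-- ---- single step: A's body equals B's body and the invariant is maintained ----
theorem pvStepEq (snap : List Int) (hd : List Int) (lb : List String) (ch : Bool)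
    (idx : PySem.Dict (Int × String) (List Int)) (i : Int)
    (hInv : pvInv snap lb idx) (h0 : 0 ≤ i) (hlen : i < PySem.List.len snap) :
    pvStepA (pvGetChildren snap) (hd, lb, ch) i
        = (let q := pvStepB snap (hd, lb, idx, ch) i; (q.1, q.2.1, q.2.2.2))
      ∧ pvInv snap (pvStepB snap (hd, lb, idx, ch) i).2.1 (pvStepB snap (hd, lb, idx, ch) i).2.2.1 := by
  by_cases hin : PySem.Str.isIn "^" (PySem.List.pyGetD lb i "") = true
  · have hknn : ¬ (PySem.Str.rfind (PySem.List.pyGetD lb i "") "^" < 0) := by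
      intro hlt
      rw [(pvRfindNegIff _).mp hlt] at hin
      exact Bool.false_ne_true hin
    have hb : ∀ h t, idx.getD (h, t) [] = pvBkt snap lb h t := hInv
    simp only [pvStepA, pvStepB, hin, if_true, if_neg hknn, hb]
    rw [pvFoundEq snap lb (PySem.List.pyGetD hd i 0)
      (PySem.Str.slice (PySem.List.pyGetD lb i "")
        (some (PySem.Str.rfind (PySem.List.pyGetD lb i "") "^" + 1)) none) i]
    by_cases hf : ((match (pvBkt snap lb (PySem.List.pyGetD hd i 0)
        (PySem.Str.slice (PySem.List.pyGetD lb i "")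
          (some (PySem.Str.rfind (PySem.List.pyGetD lb i "") "^" + 1)) none)).find?
          (fun s => s != i) with
        | some s => s
        | none => (-1 : Int)) != -1) = true
    · simp only [hf, if_true]
      refine ⟨trivial, ?_⟩
      have hiN : i.toNat < lb.length := pvInRangeOfHat lb i h0 hin
      have hknn' : 0 ≤ PySem.Str.rfind (PySem.List.pyGetD lb i "") "^" := by omega
      have hbne : PySem.Str.slice (PySem.List.pyGetD lb i "") none
          (some (PySem.Str.rfind (PySem.List.pyGetD lb i "") "^")) ≠ PySem.List.pyGetD lb i "" :=
        pvBaseNe _ hknn'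
      rw [pvSetDIn lb i _ h0 hiN]
      exact pvInvUpdate snap lb idx i _ hInv h0 hlen hiN hbne
    · simp only [hf]
      exact ⟨rfl, hInv⟩
  · have hk : PySem.Str.rfind (PySem.List.pyGetD lb i "") "^" < 0 :=
      (pvRfindNegIff _).mpr (Bool.not_eq_true _ ▸ (by revert hin; cases h : PySem.Str.isIn "^" (PySem.List.pyGetD lb i "") <;> simp))
    simp only [pvStepA, pvStepB, hin, if_pos hk]
    exact ⟨rfl, hInv⟩

-- ---- folding the steps ----
theorem pvFoldEq (snap : List Int) (r : List Int)
    (hr : ∀ i ∈ r, 0 ≤ i ∧ i < PySem.List.len snap) :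
    ∀ (hd : List Int) (lb : List String) (ch : Bool)
      (idx : PySem.Dict (Int × String) (List Int)), pvInv snap lb idx →
      r.foldl (pvStepA (pvGetChildren snap)) (hd, lb, ch)
        = (let q := r.foldl (pvStepB snap) (hd, lb, idx, ch); (q.1, q.2.1, q.2.2.2)) := by
  induction r with
  | nil => intro hd lb ch idx _; rfl
  | cons i rest ih =>
    intro hd lb ch idx hInv
    obtain ⟨hi0, hil⟩ := hr i List.mem_cons_self
    obtain ⟨hstep, hInv'⟩ := pvStepEq snap hd lb ch idx i hInv hi0 hil
    simp only [List.foldl_cons]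
    rw [hstep]
    exact ih (fun j hj => hr j (List.mem_cons_of_mem _ hj)) _ _ _ _ hInv'

theorem pvPassEq (hd : List Int) (lb : List String)
    (hpre : hd.length ≤ lb.length ∨ hd.length ≤ 1) : pvPassA hd lb = pvPassB hd lb := by
  rcases hpre with hlen | hone
  · unfold pvPassA pvPassB
    exact pvFoldEq hd (PySem.List.pyRange 1 (PySem.List.len hd))
      (fun i hi => by
        obtain ⟨h1, h2⟩ := PySem.List.mem_pyRange_one.mp hi
        exact ⟨by omega, h2⟩)
      hd lb false (pvBuildIndex hd lb) (pvBuildIndexInv hd lb hlen)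
  · have hnil : PySem.List.pyRange 1 (PySem.List.len hd) = [] := by
      apply PySem.List.pyRange_one_eq_nil
      rw [PySem.List.len_eq]
      omega
    unfold pvPassA pvPassB
    rw [hnil]
    rfl

-- ---- both pass bodies preserve lengths (pySetD keeps the list length) ----
theorem pvStepALen (children : PySem.Dict Int (List Int)) (st : List Int × List String × Bool)
    (i : Int) : (pvStepA children st i).1.length = st.1.length
      ∧ (pvStepA children st i).2.1.length = st.2.1.length := by
  constructor <;> simp only [pvStepA] <;> split_ifs <;>
    simp [PySem.List.length_pySetD]

theorem pvFoldALen (children : PySem.Dict Int (List Int)) (r : List Int) :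
    ∀ st : List Int × List String × Bool,
      (r.foldl (pvStepA children) st).1.length = st.1.length
        ∧ (r.foldl (pvStepA children) st).2.1.length = st.2.1.length := by
  induction r with
  | nil => intro st; exact ⟨rfl, rfl⟩
  | cons i rest ih =>
    intro st
    obtain ⟨h1, h2⟩ := pvStepALen children st i
    obtain ⟨h3, h4⟩ := ih (pvStepA children st i)
    exact ⟨by rw [List.foldl_cons, h3, h1], by rw [List.foldl_cons, h4, h2]⟩

theorem pvPassALen (hd : List Int) (lb : List String) :
    (pvPassA hd lb).1.length = hd.length ∧ (pvPassA hd lb).2.1.length = lb.length := by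
  unfold pvPassA
  exact pvFoldALen _ _ _

theorem pvLoopEq : ∀ (fuel : Nat) (hd : List Int) (lb : List String),
    hd.length ≤ lb.length ∨ hd.length ≤ 1 → pvLoopA fuel hd lb = pvLoopB fuel hd lb := by
  intro fuel
  induction fuel with
  | zero => intro hd lb _; rfl
  | succ n ih =>
    intro hd lb hpre
    obtain ⟨hl1, hl2⟩ := pvPassALen hd lb
    simp only [pvLoopA, pvLoopB, ← pvPassEq hd lb hpre]
    split
    · exact ih _ _ (by rw [hl1, hl2]; exact hpre)
    · rfl

-- ===== VERDICT (by name: the statement is the Claim_ definition above) =====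
theorem sink_arcs_spec : Claim_equal_sink_arcs := by
  intro words heads labels _ hpre
  unfold Spec_sink_arcs sink_arcs sink_arcs_alt
  exact pvLoopEq (pvFuel labels) heads labels hpre
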